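-- pv_equiv track=rewrite | github.com/mnvtrvd/sv2fsm | sv2fsm.py | get_depth
-- ===== SOURCE A (Python) =====
-- def get_depth(line):
--     tabs = 0
--     for c in line:
--         if c == "\t":
--             tabs += 1
--         else:
--             break
--
--     return tabs
-- ===== SOURCE B (Python) =====
-- def get_depth(line):
--     return len(line) - len(line.lstrip("\t"))
-- ===== Notes on version B (the rewrite author's own statement) =====
-- stated objective: idiomatic
-- what changed: Replaces the explicit iterate-with-break counting loop by a closed string expression: total length minus the length after the leading tabs are stripped off.
import Mathlib
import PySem

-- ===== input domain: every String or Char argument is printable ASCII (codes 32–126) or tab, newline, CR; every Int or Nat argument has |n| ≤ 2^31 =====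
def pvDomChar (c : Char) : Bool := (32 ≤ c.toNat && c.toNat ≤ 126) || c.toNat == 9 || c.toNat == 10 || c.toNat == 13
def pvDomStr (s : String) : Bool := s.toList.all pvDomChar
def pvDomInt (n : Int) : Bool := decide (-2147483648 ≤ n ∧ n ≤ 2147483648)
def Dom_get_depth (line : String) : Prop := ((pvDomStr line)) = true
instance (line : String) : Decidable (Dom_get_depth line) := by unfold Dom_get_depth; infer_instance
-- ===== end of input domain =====

-- B: closed string-method expression (length minus length after lstrip('\t')) instead of A's iterate-with-break loop; no side effects. Equivalence proved on all inputs.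
-- ===== PORT A =====
def get_depth_loop : List Char → Int → Int
  | [], tabs => tabs
  | c :: rest, tabs => if c == '\t' then get_depth_loop rest (tabs + 1) else tabs

def get_depth (line : String) : Int := get_depth_loop line.toList 0

-- ===== PORT B =====
-- line.lstrip("\t") ported as dropWhile (· == '\t') on the code points (exact: lstrip with an explicit char set)
def get_depth_alt (line : String) : Int :=
  (line.toList.length : Int) - ((line.toList.dropWhile (· == '\t')).length : Int)

-- ===== PRECONDITION & SPEC =====
def Spec_get_depth (line : String) (out : Int) : Prop := out = get_depth_alt line
instance (line : String) (out : Int) : Decidable (Spec_get_depth line out) := by unfold Spec_get_depth; infer_instance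

-- ===== CLAIM (what is proved, stated in full; the proofs are below) =====
def Claim_equal_get_depth : Prop := ∀ (line : String), Dom_get_depth line → Spec_get_depth line (get_depth line)

-- ===== LEMMAS AND PROOFS =====

-- ===== VERDICT (by name: the statement is the Claim_ definition above) =====
lemma get_depth_loop_eq (cs : List Char) (tabs : Int) :
    get_depth_loop cs tabs = tabs + ((cs.length : Int) - ((cs.dropWhile (· == '\t')).length : Int)) := by
  induction cs generalizing tabs with
  | nil => simp [get_depth_loop]
  | cons c rest ih =>
    by_cases h : c = '\t'
    · simp [get_depth_loop, h, ih, List.dropWhile]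
      omega
    · have hb : (c == '\t') = false := by simp [h]
      simp [get_depth_loop, hb, List.dropWhile]

theorem get_depth_spec : Claim_equal_get_depth := by
  intro line _
  unfold Spec_get_depth get_depth get_depth_alt
  rw [get_depth_loop_eq]
  omega
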